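-- pv_equiv track=rewrite | github.com/maziyarpanahi/openmed | healthadvocate/core/cross_validation.py | _match_entities
-- ===== SOURCE A (Python) =====
-- def _match_entities(ner_texts: set[str], llm_texts: set[str]) -> tuple[set[str], set[str], set[str]]:
--     """Match NER entities against LLM texts using substring matching."""
--     confirmed: set[str] = set()
--     for ner in ner_texts:
--         for llm in llm_texts:
--             if ner in llm or llm in ner:
--                 confirmed.add(ner)
--                 break
--     ner_only = ner_texts - confirmed
--     llm_only = llm_texts - {llm for llm in llm_texts for n in confirmed if n in llm or llm in n}
--     return confirmed, ner_only, llm_only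
-- ===== SOURCE B (Python) =====
-- def _match_entities(ner_texts: set[str], llm_texts: set[str]) -> tuple[set[str], set[str], set[str]]:
--     """Single combined double pass: record confirmed NER texts and matched LLM
--     texts together, then both 'only' sides are plain set differences."""
--     confirmed: set[str] = set()
--     matched: set[str] = set()
--     for ner in ner_texts:
--         for llm in llm_texts:
--             if ner in llm or llm in ner:
--                 confirmed.add(ner)
--                 matched.add(llm)
--     return confirmed, ner_texts - confirmed, llm_texts - matched
-- ===== Notes on version B (the rewrite author's own statement) =====
-- stated objective: simpler
-- what changed: B replaces A's break-early confirmation loop plus a second comprehension that re-matches every llm text against the confirmed set by one exhaustive double loop that records confirmed ner texts and matched llm texts together, so both 'only' outputs are plain set differences.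
import Mathlib
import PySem

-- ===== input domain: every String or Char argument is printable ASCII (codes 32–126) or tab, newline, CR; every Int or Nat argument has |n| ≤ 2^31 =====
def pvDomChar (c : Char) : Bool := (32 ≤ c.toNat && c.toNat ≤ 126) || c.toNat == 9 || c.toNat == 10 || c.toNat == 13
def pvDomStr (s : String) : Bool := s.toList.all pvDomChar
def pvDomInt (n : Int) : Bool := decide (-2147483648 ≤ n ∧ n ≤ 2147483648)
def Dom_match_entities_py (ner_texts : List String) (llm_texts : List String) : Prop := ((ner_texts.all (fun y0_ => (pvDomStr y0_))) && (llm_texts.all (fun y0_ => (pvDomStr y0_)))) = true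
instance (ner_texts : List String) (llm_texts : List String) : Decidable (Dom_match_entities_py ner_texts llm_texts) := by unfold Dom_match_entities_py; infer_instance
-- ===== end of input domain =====

-- B fuses A's break-early confirmation loop and its second re-matching comprehension into one
-- exhaustive double loop recording confirmed NER texts and matched LLM texts together (objective: simpler).


-- ===== PORT A =====
-- inner 'for llm in llm_texts: if ner in llm or llm in ner: confirmed.add(ner); break'
def pvAInner (ner : String) : List String → PySem.Set String → PySem.Set String
  | [], conf => conf
  | llm :: rest, conf =>
    if PySem.Str.isIn ner llm || PySem.Str.isIn llm ner then PySem.Set.add conf ner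
    else pvAInner ner rest conf

def match_entities_py (ner_texts : List String) (llm_texts : List String) : List String × List String × List String :=
  let confirmed : PySem.Set String := ner_texts.foldl (fun conf ner => pvAInner ner llm_texts conf) PySem.Set.empty
  let ner_only := PySem.Set.diff (PySem.Set.ofList ner_texts) confirmed
  -- {llm for llm in llm_texts for n in confirmed if n in llm or llm in n}
  let matched : PySem.Set String := llm_texts.foldl (fun s llm =>
      confirmed.foldl (fun s n =>
        if PySem.Str.isIn n llm || PySem.Str.isIn llm n then PySem.Set.add s llm else s) s)
    PySem.Set.empty
  let llm_only := PySem.Set.diff (PySem.Set.ofList llm_texts) matched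
  (confirmed, ner_only, llm_only)

-- ===== PORT B =====
def match_entities_py_alt (ner_texts : List String) (llm_texts : List String) : List String × List String × List String :=
  let st : PySem.Set String × PySem.Set String := ner_texts.foldl (fun st ner =>
      llm_texts.foldl (fun st llm =>
        if PySem.Str.isIn ner llm || PySem.Str.isIn llm ner
        then (PySem.Set.add st.1 ner, PySem.Set.add st.2 llm) else st) st)
    (PySem.Set.empty, PySem.Set.empty)
  (st.1, PySem.Set.diff (PySem.Set.ofList ner_texts) st.1,
         PySem.Set.diff (PySem.Set.ofList llm_texts) st.2)

-- ===== PRECONDITION & SPEC =====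
def Spec_match_entities_py (ner_texts : List String) (llm_texts : List String) (out : List String × List String × List String) : Prop := out = match_entities_py_alt ner_texts llm_texts
instance (ner_texts : List String) (llm_texts : List String) (out : List String × List String × List String) : Decidable (Spec_match_entities_py ner_texts llm_texts out) := by unfold Spec_match_entities_py; infer_instance

-- ===== CLAIM (what is proved, stated in full; the proofs are below) =====
def Claim_equal_match_entities_py : Prop := ∀ (ner_texts : List String) (llm_texts : List String), Dom_match_entities_py ner_texts llm_texts → Spec_match_entities_py ner_texts llm_texts (match_entities_py ner_texts llm_texts)

-- ===== LEMMAS AND PROOFS =====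

-- the match condition both programs test
def pvQ (a b : String) : Bool := PySem.Str.isIn a b || PySem.Str.isIn b a

-- fold the ports' literal condition into pvQ (rfl; used to normalise goals)
lemma pvQ_def (a b : String) : (PySem.Str.isIn a b || PySem.Str.isIn b a) = pvQ a b := rfl

-- A's break-early inner loop adds ner iff some llm matches
lemma pvAInner_eq (ner : String) (ls : List String) (conf : PySem.Set String) :
    pvAInner ner ls conf =
      if ls.any (fun llm => pvQ ner llm) then PySem.Set.add conf ner else conf := by
  induction ls with
  | nil => simp [pvAInner]
  | cons llm rest ih =>
    have hstep : pvAInner ner (llm :: rest) conf =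
        if pvQ ner llm then PySem.Set.add conf ner else pvAInner ner rest conf := rfl
    rw [hstep, List.any_cons, ih]
    by_cases h : pvQ ner llm
    · simp [h]
    · simp [h]

-- membership in a fold that conditionally adds the iterated element
lemma pv_mem_foldl_addIf (q : String → Bool) (y : String) (ls : List String) (s : PySem.Set String) :
    y ∈ ls.foldl (fun s x => if q x then PySem.Set.add s x else s) s ↔
      y ∈ s ∨ (y ∈ ls ∧ q y = true) := by
  induction ls generalizing s with
  | nil => simp
  | cons x rest ih =>
    by_cases h : q x
    · simp only [List.foldl_cons, if_pos h, ih, PySem.Set.mem_add, List.mem_cons]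
      constructor
      · rintro ((hs | rfl) | ⟨hr, hq⟩)
        · exact Or.inl hs
        · exact Or.inr ⟨Or.inl rfl, h⟩
        · exact Or.inr ⟨Or.inr hr, hq⟩
      · rintro (hs | ⟨(rfl | hr), hq⟩)
        · exact Or.inl (Or.inl hs)
        · exact Or.inl (Or.inr rfl)
        · exact Or.inr ⟨hr, hq⟩
    · simp only [List.foldl_cons, if_neg h, ih, List.mem_cons]
      constructor
      · rintro (hs | ⟨hr, hq⟩)
        · exact Or.inl hs
        · exact Or.inr ⟨Or.inr hr, hq⟩
      · rintro (hs | ⟨(rfl | hr), hq⟩)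
        · exact Or.inl hs
        · exact absurd hq h
        · exact Or.inr ⟨hr, hq⟩

-- a fold that conditionally adds a FIXED element x collapses to one conditional add
lemma pv_foldl_add_fixed (r : String → Bool) (x : String) (ls : List String) (s : PySem.Set String) :
    ls.foldl (fun s n => if r n then PySem.Set.add s x else s) s =
      if ls.any r then PySem.Set.add s x else s := by
  induction ls generalizing s with
  | nil => simp
  | cons n rest ih =>
    by_cases h : r n
    · simp [h, ih]
    · simp [h, ih]

-- B's inner loop, split into its two components
lemma pv_bInner_eq (ner : String) (ls : List String) (st : PySem.Set String × PySem.Set String) :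
    ls.foldl (fun st llm =>
        if PySem.Str.isIn ner llm || PySem.Str.isIn llm ner
        then (PySem.Set.add st.1 ner, PySem.Set.add st.2 llm) else st) st =
      (if ls.any (fun llm => pvQ ner llm) then PySem.Set.add st.1 ner else st.1,
       ls.foldl (fun m llm => if pvQ ner llm then PySem.Set.add m llm else m) st.2) := by
  simp only [pvQ_def]
  induction ls generalizing st with
  | nil => simp
  | cons llm rest ih =>
    simp only [List.foldl_cons, List.any_cons, ih]
    by_cases h : pvQ ner llm
    · by_cases h2 : rest.any (fun llm => pvQ ner llm) <;> simp [h, h2]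
    · simp [h]

-- membership in B's matched set: llm texts matched by SOME ner text
lemma pv_mem_matB (y : String) (ner_texts ls : List String) (m : PySem.Set String) :
    y ∈ ner_texts.foldl
          (fun m x => ls.foldl (fun m llm => if pvQ x llm then PySem.Set.add m llm else m) m) m ↔
      y ∈ m ∨ ∃ x ∈ ner_texts, y ∈ ls ∧ pvQ x y = true := by
  induction ner_texts generalizing m with
  | nil => simp
  | cons x rest ih =>
    simp only [List.foldl_cons, ih, pv_mem_foldl_addIf, List.mem_cons]
    constructor
    · rintro ((hm | ⟨hl, hq⟩) | ⟨n, hn, hl, hq⟩)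
      · exact Or.inl hm
      · exact Or.inr ⟨x, Or.inl rfl, hl, hq⟩
      · exact Or.inr ⟨n, Or.inr hn, hl, hq⟩
    · rintro (hm | ⟨n, (rfl | hn), hl, hq⟩)
      · exact Or.inl (Or.inl hm)
      · exact Or.inl (Or.inr ⟨hl, hq⟩)
      · exact Or.inr ⟨n, hn, hl, hq⟩

-- membership in A's matched set: llm texts matched by SOME confirmed text
lemma pv_mem_matA (y : String) (ls C : List String) (m : PySem.Set String) :
    y ∈ ls.foldl (fun s llm => C.foldl (fun s n => if pvQ n llm then PySem.Set.add s llm else s) s) m ↔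
      y ∈ m ∨ (y ∈ ls ∧ ∃ n ∈ C, pvQ n y = true) := by
  induction ls generalizing m with
  | nil => simp
  | cons llm rest ih =>
    rw [List.foldl_cons, pv_foldl_add_fixed (fun n => pvQ n llm) llm C m]
    by_cases h : C.any (fun n => pvQ n llm) = true
    · rw [if_pos h, ih]
      simp only [PySem.Set.mem_add, List.mem_cons]
      constructor
      · rintro ((hm | rfl) | ⟨hr, hex⟩)
        · exact Or.inl hm
        · exact Or.inr ⟨Or.inl rfl, by simpa using List.any_eq_true.mp h⟩
        · exact Or.inr ⟨Or.inr hr, hex⟩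
      · rintro (hm | ⟨(rfl | hr), hex⟩)
        · exact Or.inl (Or.inl hm)
        · exact Or.inl (Or.inr rfl)
        · exact Or.inr ⟨hr, hex⟩
    · rw [if_neg h, ih]
      simp only [List.mem_cons]
      constructor
      · rintro (hm | ⟨hr, hex⟩)
        · exact Or.inl hm
        · exact Or.inr ⟨Or.inr hr, hex⟩
      · rintro (hm | ⟨(rfl | hr), hex⟩)
        · exact Or.inl hm
        · exact absurd (List.any_eq_true.mpr (by simpa using hex)) h
        · exact Or.inr ⟨hr, hex⟩

-- set difference only depends on the MEMBERS of the subtracted set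
lemma pv_diff_congr (s t₁ t₂ : PySem.Set String) (h : ∀ x, x ∈ t₁ ↔ x ∈ t₂) :
    PySem.Set.diff s t₁ = PySem.Set.diff s t₂ := by
  show s.filter _ = s.filter _
  refine List.filter_congr (fun x _ => ?_)
  simpa using h x

lemma pv_main (ner_texts llm_texts : List String) :
    match_entities_py ner_texts llm_texts = match_entities_py_alt ner_texts llm_texts := by
  unfold match_entities_py match_entities_py_alt
  simp only [pv_bInner_eq]
  simp only [pvAInner_eq, pvQ_def]
  rw [PySem.List.foldl_prod_mk
        (fun c ner => if llm_texts.any (fun llm => pvQ ner llm) then PySem.Set.add c ner else c)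
        (fun m ner => llm_texts.foldl (fun m llm => if pvQ ner llm then PySem.Set.add m llm else m) m)
        ner_texts PySem.Set.empty PySem.Set.empty]
  refine Prod.ext rfl (Prod.ext rfl ?_)
  show PySem.Set.diff (PySem.Set.ofList llm_texts)
        (llm_texts.foldl
          (fun s llm =>
            List.foldl (fun s n => if pvQ n llm then PySem.Set.add s llm else s) s
              (ner_texts.foldl
                (fun conf ner =>
                  if llm_texts.any (fun llm => pvQ ner llm) then PySem.Set.add conf ner else conf)
                PySem.Set.empty))
          PySem.Set.empty) =
      PySem.Set.diff (PySem.Set.ofList llm_texts)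
        (ner_texts.foldl
          (fun m ner => llm_texts.foldl (fun m llm => if pvQ ner llm then PySem.Set.add m llm else m) m)
          PySem.Set.empty)
  set C : PySem.Set String :=
    ner_texts.foldl
      (fun conf ner =>
        if llm_texts.any (fun llm => pvQ ner llm) then PySem.Set.add conf ner else conf)
      PySem.Set.empty with hC
  have memC : ∀ z, z ∈ C ↔ z ∈ ner_texts ∧ llm_texts.any (fun llm => pvQ z llm) = true := by
    intro z
    rw [hC, pv_mem_foldl_addIf (fun x => llm_texts.any (fun llm => pvQ x llm))]
    simp [PySem.Set.empty]
  apply pv_diff_congr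
  intro y
  rw [pv_mem_matA y llm_texts C PySem.Set.empty, pv_mem_matB y ner_texts llm_texts PySem.Set.empty]
  simp only [PySem.Set.empty, List.not_mem_nil, false_or]
  constructor
  · rintro ⟨hl, n, hnC, hq⟩
    exact ⟨n, ((memC n).mp hnC).1, hl, hq⟩
  · rintro ⟨x, hx, hl, hq⟩
    exact ⟨hl, x, (memC x).mpr ⟨hx, List.any_eq_true.mpr ⟨y, hl, hq⟩⟩, hq⟩

-- ===== VERDICT (by name: the statement is the Claim_ definition above) =====
theorem match_entities_py_spec : Claim_equal_match_entities_py := by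
  intro ner_texts llm_texts _
  exact pv_main ner_texts llm_texts
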